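-- pv_equiv track=rewrite | github.com/kh277/BOJ | 백준/Gold/16565. N포커/N포커.py | solve
-- ===== SOURCE A (Python) =====
-- MOD = 10007
--
-- def initComb():
--     DP = [[0] * 53 for _ in range(53)]
--
--     for i  in range(53):
--         for j in range(i+1):
--             if i == j or j == 0:
--                 DP[i][j] = 1
--             else:
--                 DP[i][j] = (DP[i-1][j-1] + DP[i-1][j]) % MOD
--
--     return DP
--
-- def solve(N):
--     DP = initComb()
--
--     result = 0
--     for i in range(1, N//4+1):
--         if i & 1:
--             result += (DP[13][i] * DP[52-(i<<2)][N-(i<<2)]) % MOD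
--             result = result % MOD
--         else:
--             result -= (DP[13][i] * DP[52-(i<<2)][N-(i<<2)]) % MOD
--             result = (result + MOD) % MOD
--
--     return result
-- ===== SOURCE B (Python) =====
-- MOD = 10007
--
-- def comb(n, k):
--     # exact binomial coefficient via the multiplicative formula (no table)
--     if k < 0 or k > n:
--         return 0
--     r = 1
--     for t in range(k):
--         r = r * (n - t) // (t + 1)
--     return r
--
-- def solve(N):
--     result = 0
--     for i in range(1, N // 4 + 1):
--         term = (comb(13, i) * comb(52 - 4 * i, N - 4 * i)) % MOD
--         if i & 1:
--             result = (result + term) % MOD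
--         else:
--             result = (result - term + MOD) % MOD
--     return result
-- ===== Notes on version B (the rewrite author's own statement) =====
-- stated objective: simpler
-- what changed: Replaced the precomputed 53x53 Pascal-triangle DP table (initComb) with a direct multiplicative closed-form binomial computed per term inside the same inclusion-exclusion loop.
-- outside the precondition, e.g. on solve(57): A raises IndexError, B returns 0
import Mathlib
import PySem

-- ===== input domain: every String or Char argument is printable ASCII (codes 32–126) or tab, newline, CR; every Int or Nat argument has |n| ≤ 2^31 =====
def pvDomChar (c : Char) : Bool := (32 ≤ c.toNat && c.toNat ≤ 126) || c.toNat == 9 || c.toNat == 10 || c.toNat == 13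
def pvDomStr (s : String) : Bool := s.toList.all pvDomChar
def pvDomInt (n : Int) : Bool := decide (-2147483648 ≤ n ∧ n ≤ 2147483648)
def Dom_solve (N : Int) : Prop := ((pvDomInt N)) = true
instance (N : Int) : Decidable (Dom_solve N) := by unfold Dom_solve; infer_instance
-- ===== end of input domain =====

-- B drops A's 53×53 Pascal DP table and computes each inclusion-exclusion term with a
-- closed-form multiplicative binomial; equivalence is proved on N ≤ 56 (A raises above).

-- ===== PORT A =====
def pvMOD : Int := 10007

-- DP[i] lookup; in A all reads are in range (row 13 exists, inner reads hit real cells)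
def pvRow (dp : List (List Int)) (i : Int) : List Int := (PySem.List.pyGet? dp i).getD []
def pvCell (row : List Int) (j : Int) : Int := (PySem.List.pyGet? row j).getD 0

-- list assignment DP[i][j] = v; i, j are ≥ 0 at every write site, so .toNat is exact here
def pvSet2 (dp : List (List Int)) (i j : Int) (v : Int) : List (List Int) :=
  dp.set i.toNat ((pvRow dp i).set j.toNat v)

def initComb : List (List Int) :=
  let DP := List.replicate 53 (List.replicate 53 (0 : Int))
  (PySem.List.pyRange 0 53 1).foldl (fun DP i =>
    (PySem.List.pyRange 0 (i + 1) 1).foldl (fun DP j =>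
      if i == j || j == 0 then pvSet2 DP i j 1
      else pvSet2 DP i j (PySem.Int.mod (pvCell (pvRow DP (i-1)) (j-1) + pvCell (pvRow DP (i-1)) j) pvMOD))
      DP) DP

def solve (N : Int) : Int :=
  let DP := initComb
  (PySem.List.pyRange 1 (PySem.Int.floordiv N 4 + 1) 1).foldl (fun result i =>
    -- i & 1 for i ≥ 1 is parity; i << 2 is 4*i
    if PySem.Int.mod i 2 == 1 then
      PySem.Int.mod (result + PySem.Int.mod (pvCell (pvRow DP 13) i * pvCell (pvRow DP (52 - 4*i)) (N - 4*i)) pvMOD) pvMOD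
    else
      PySem.Int.mod (result - PySem.Int.mod (pvCell (pvRow DP 13) i * pvCell (pvRow DP (52 - 4*i)) (N - 4*i)) pvMOD + pvMOD) pvMOD)
    0

-- ===== PORT B =====
def pvComb (n k : Int) : Int :=
  if k < 0 || k > n then 0
  else (PySem.List.pyRange 0 k 1).foldl (fun r t => PySem.Int.floordiv (r * (n - t)) (t + 1)) 1

def solve_alt (N : Int) : Int :=
  (PySem.List.pyRange 1 (PySem.Int.floordiv N 4 + 1) 1).foldl (fun result i =>
    let term := PySem.Int.mod (pvComb 13 i * pvComb (52 - 4*i) (N - 4*i)) pvMOD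
    if PySem.Int.mod i 2 == 1 then PySem.Int.mod (result + term) pvMOD
    else PySem.Int.mod (result - term + pvMOD) pvMOD)
    0

-- ===== PRECONDITION & SPEC =====
-- Pre_ excludes exactly N ≥ 57, where A raises IndexError (table index N-4i > 52 at i = 1).
def Pre_solve (N : Int) : Prop := N ≤ 56
instance (N : Int) : Decidable (Pre_solve N) := by unfold Pre_solve; infer_instance
def pvWitness_solve : Int := 5

def Spec_solve (N : Int) (out : Int) : Prop := out = solve_alt N
instance (N : Int) (out : Int) : Decidable (Spec_solve N out) := by unfold Spec_solve; infer_instance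

-- ===== CLAIM (what is proved, stated in full; the proofs are below) =====
def Claim_equal_solve : Prop := ∀ (N : Int), Dom_solve N → Pre_solve N → Spec_solve N (solve N)

-- ===== LEMMAS AND PROOFS =====

-- the fully evaluated Pascal table (proof helper; evaluated once so each case below is cheap)
def pvTable : List (List Int) :=
  [[1, 0, 0, 0, 0, 0, 0, 0, 0, 0, 0, 0, 0, 0, 0, 0, 0, 0, 0, 0, 0, 0, 0, 0, 0, 0, 0, 0, 0, 0, 0, 0, 0, 0, 0, 0, 0, 0, 0, 0, 0, 0, 0, 0, 0, 0, 0, 0, 0, 0, 0, 0, 0],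
  [1, 1, 0, 0, 0, 0, 0, 0, 0, 0, 0, 0, 0, 0, 0, 0, 0, 0, 0, 0, 0, 0, 0, 0, 0, 0, 0, 0, 0, 0, 0, 0, 0, 0, 0, 0, 0, 0, 0, 0, 0, 0, 0, 0, 0, 0, 0, 0, 0, 0, 0, 0, 0],
  [1, 2, 1, 0, 0, 0, 0, 0, 0, 0, 0, 0, 0, 0, 0, 0, 0, 0, 0, 0, 0, 0, 0, 0, 0, 0, 0, 0, 0, 0, 0, 0, 0, 0, 0, 0, 0, 0, 0, 0, 0, 0, 0, 0, 0, 0, 0, 0, 0, 0, 0, 0, 0],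
  [1, 3, 3, 1, 0, 0, 0, 0, 0, 0, 0, 0, 0, 0, 0, 0, 0, 0, 0, 0, 0, 0, 0, 0, 0, 0, 0, 0, 0, 0, 0, 0, 0, 0, 0, 0, 0, 0, 0, 0, 0, 0, 0, 0, 0, 0, 0, 0, 0, 0, 0, 0, 0],
  [1, 4, 6, 4, 1, 0, 0, 0, 0, 0, 0, 0, 0, 0, 0, 0, 0, 0, 0, 0, 0, 0, 0, 0, 0, 0, 0, 0, 0, 0, 0, 0, 0, 0, 0, 0, 0, 0, 0, 0, 0, 0, 0, 0, 0, 0, 0, 0, 0, 0, 0, 0, 0],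
  [1, 5, 10, 10, 5, 1, 0, 0, 0, 0, 0, 0, 0, 0, 0, 0, 0, 0, 0, 0, 0, 0, 0, 0, 0, 0, 0, 0, 0, 0, 0, 0, 0, 0, 0, 0, 0, 0, 0, 0, 0, 0, 0, 0, 0, 0, 0, 0, 0, 0, 0, 0, 0],
  [1, 6, 15, 20, 15, 6, 1, 0, 0, 0, 0, 0, 0, 0, 0, 0, 0, 0, 0, 0, 0, 0, 0, 0, 0, 0, 0, 0, 0, 0, 0, 0, 0, 0, 0, 0, 0, 0, 0, 0, 0, 0, 0, 0, 0, 0, 0, 0, 0, 0, 0, 0, 0],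
  [1, 7, 21, 35, 35, 21, 7, 1, 0, 0, 0, 0, 0, 0, 0, 0, 0, 0, 0, 0, 0, 0, 0, 0, 0, 0, 0, 0, 0, 0, 0, 0, 0, 0, 0, 0, 0, 0, 0, 0, 0, 0, 0, 0, 0, 0, 0, 0, 0, 0, 0, 0, 0],
  [1, 8, 28, 56, 70, 56, 28, 8, 1, 0, 0, 0, 0, 0, 0, 0, 0, 0, 0, 0, 0, 0, 0, 0, 0, 0, 0, 0, 0, 0, 0, 0, 0, 0, 0, 0, 0, 0, 0, 0, 0, 0, 0, 0, 0, 0, 0, 0, 0, 0, 0, 0, 0],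
  [1, 9, 36, 84, 126, 126, 84, 36, 9, 1, 0, 0, 0, 0, 0, 0, 0, 0, 0, 0, 0, 0, 0, 0, 0, 0, 0, 0, 0, 0, 0, 0, 0, 0, 0, 0, 0, 0, 0, 0, 0, 0, 0, 0, 0, 0, 0, 0, 0, 0, 0, 0, 0],
  [1, 10, 45, 120, 210, 252, 210, 120, 45, 10, 1, 0, 0, 0, 0, 0, 0, 0, 0, 0, 0, 0, 0, 0, 0, 0, 0, 0, 0, 0, 0, 0, 0, 0, 0, 0, 0, 0, 0, 0, 0, 0, 0, 0, 0, 0, 0, 0, 0, 0, 0, 0, 0],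
  [1, 11, 55, 165, 330, 462, 462, 330, 165, 55, 11, 1, 0, 0, 0, 0, 0, 0, 0, 0, 0, 0, 0, 0, 0, 0, 0, 0, 0, 0, 0, 0, 0, 0, 0, 0, 0, 0, 0, 0, 0, 0, 0, 0, 0, 0, 0, 0, 0, 0, 0, 0, 0],
  [1, 12, 66, 220, 495, 792, 924, 792, 495, 220, 66, 12, 1, 0, 0, 0, 0, 0, 0, 0, 0, 0, 0, 0, 0, 0, 0, 0, 0, 0, 0, 0, 0, 0, 0, 0, 0, 0, 0, 0, 0, 0, 0, 0, 0, 0, 0, 0, 0, 0, 0, 0, 0],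
  [1, 13, 78, 286, 715, 1287, 1716, 1716, 1287, 715, 286, 78, 13, 1, 0, 0, 0, 0, 0, 0, 0, 0, 0, 0, 0, 0, 0, 0, 0, 0, 0, 0, 0, 0, 0, 0, 0, 0, 0, 0, 0, 0, 0, 0, 0, 0, 0, 0, 0, 0, 0, 0, 0],
  [1, 14, 91, 364, 1001, 2002, 3003, 3432, 3003, 2002, 1001, 364, 91, 14, 1, 0, 0, 0, 0, 0, 0, 0, 0, 0, 0, 0, 0, 0, 0, 0, 0, 0, 0, 0, 0, 0, 0, 0, 0, 0, 0, 0, 0, 0, 0, 0, 0, 0, 0, 0, 0, 0, 0],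
  [1, 15, 105, 455, 1365, 3003, 5005, 6435, 6435, 5005, 3003, 1365, 455, 105, 15, 1, 0, 0, 0, 0, 0, 0, 0, 0, 0, 0, 0, 0, 0, 0, 0, 0, 0, 0, 0, 0, 0, 0, 0, 0, 0, 0, 0, 0, 0, 0, 0, 0, 0, 0, 0, 0, 0],
  [1, 16, 120, 560, 1820, 4368, 8008, 1433, 2863, 1433, 8008, 4368, 1820, 560, 120, 16, 1, 0, 0, 0, 0, 0, 0, 0, 0, 0, 0, 0, 0, 0, 0, 0, 0, 0, 0, 0, 0, 0, 0, 0, 0, 0, 0, 0, 0, 0, 0, 0, 0, 0, 0, 0, 0],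
  [1, 17, 136, 680, 2380, 6188, 2369, 9441, 4296, 4296, 9441, 2369, 6188, 2380, 680, 136, 17, 1, 0, 0, 0, 0, 0, 0, 0, 0, 0, 0, 0, 0, 0, 0, 0, 0, 0, 0, 0, 0, 0, 0, 0, 0, 0, 0, 0, 0, 0, 0, 0, 0, 0, 0, 0],
  [1, 18, 153, 816, 3060, 8568, 8557, 1803, 3730, 8592, 3730, 1803, 8557, 8568, 3060, 816, 153, 18, 1, 0, 0, 0, 0, 0, 0, 0, 0, 0, 0, 0, 0, 0, 0, 0, 0, 0, 0, 0, 0, 0, 0, 0, 0, 0, 0, 0, 0, 0, 0, 0, 0, 0, 0],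
  [1, 19, 171, 969, 3876, 1621, 7118, 353, 5533, 2315, 2315, 5533, 353, 7118, 1621, 3876, 969, 171, 19, 1, 0, 0, 0, 0, 0, 0, 0, 0, 0, 0, 0, 0, 0, 0, 0, 0, 0, 0, 0, 0, 0, 0, 0, 0, 0, 0, 0, 0, 0, 0, 0, 0, 0],
  [1, 20, 190, 1140, 4845, 5497, 8739, 7471, 5886, 7848, 4630, 7848, 5886, 7471, 8739, 5497, 4845, 1140, 190, 20, 1, 0, 0, 0, 0, 0, 0, 0, 0, 0, 0, 0, 0, 0, 0, 0, 0, 0, 0, 0, 0, 0, 0, 0, 0, 0, 0, 0, 0, 0, 0, 0, 0],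
  [1, 21, 210, 1330, 5985, 335, 4229, 6203, 3350, 3727, 2471, 2471, 3727, 3350, 6203, 4229, 335, 5985, 1330, 210, 21, 1, 0, 0, 0, 0, 0, 0, 0, 0, 0, 0, 0, 0, 0, 0, 0, 0, 0, 0, 0, 0, 0, 0, 0, 0, 0, 0, 0, 0, 0, 0, 0],
  [1, 22, 231, 1540, 7315, 6320, 4564, 425, 9553, 7077, 6198, 4942, 6198, 7077, 9553, 425, 4564, 6320, 7315, 1540, 231, 22, 1, 0, 0, 0, 0, 0, 0, 0, 0, 0, 0, 0, 0, 0, 0, 0, 0, 0, 0, 0, 0, 0, 0, 0, 0, 0, 0, 0, 0, 0, 0],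
  [1, 23, 253, 1771, 8855, 3628, 877, 4989, 9978, 6623, 3268, 1133, 1133, 3268, 6623, 9978, 4989, 877, 3628, 8855, 1771, 253, 23, 1, 0, 0, 0, 0, 0, 0, 0, 0, 0, 0, 0, 0, 0, 0, 0, 0, 0, 0, 0, 0, 0, 0, 0, 0, 0, 0, 0, 0, 0],
  [1, 24, 276, 2024, 619, 2476, 4505, 5866, 4960, 6594, 9891, 4401, 2266, 4401, 9891, 6594, 4960, 5866, 4505, 2476, 619, 2024, 276, 24, 1, 0, 0, 0, 0, 0, 0, 0, 0, 0, 0, 0, 0, 0, 0, 0, 0, 0, 0, 0, 0, 0, 0, 0, 0, 0, 0, 0, 0],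
  [1, 25, 300, 2300, 2643, 3095, 6981, 364, 819, 1547, 6478, 4285, 6667, 6667, 4285, 6478, 1547, 819, 364, 6981, 3095, 2643, 2300, 300, 25, 1, 0, 0, 0, 0, 0, 0, 0, 0, 0, 0, 0, 0, 0, 0, 0, 0, 0, 0, 0, 0, 0, 0, 0, 0, 0, 0, 0],
  [1, 26, 325, 2600, 4943, 5738, 69, 7345, 1183, 2366, 8025, 756, 945, 3327, 945, 756, 8025, 2366, 1183, 7345, 69, 5738, 4943, 2600, 325, 26, 1, 0, 0, 0, 0, 0, 0, 0, 0, 0, 0, 0, 0, 0, 0, 0, 0, 0, 0, 0, 0, 0, 0, 0, 0, 0, 0],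
  [1, 27, 351, 2925, 7543, 674, 5807, 7414, 8528, 3549, 384, 8781, 1701, 4272, 4272, 1701, 8781, 384, 3549, 8528, 7414, 5807, 674, 7543, 2925, 351, 27, 1, 0, 0, 0, 0, 0, 0, 0, 0, 0, 0, 0, 0, 0, 0, 0, 0, 0, 0, 0, 0, 0, 0, 0, 0, 0],
  [1, 28, 378, 3276, 461, 8217, 6481, 3214, 5935, 2070, 3933, 9165, 475, 5973, 8544, 5973, 475, 9165, 3933, 2070, 5935, 3214, 6481, 8217, 461, 3276, 378, 28, 1, 0, 0, 0, 0, 0, 0, 0, 0, 0, 0, 0, 0, 0, 0, 0, 0, 0, 0, 0, 0, 0, 0, 0, 0],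
  [1, 29, 406, 3654, 3737, 8678, 4691, 9695, 9149, 8005, 6003, 3091, 9640, 6448, 4510, 4510, 6448, 9640, 3091, 6003, 8005, 9149, 9695, 4691, 8678, 3737, 3654, 406, 29, 1, 0, 0, 0, 0, 0, 0, 0, 0, 0, 0, 0, 0, 0, 0, 0, 0, 0, 0, 0, 0, 0, 0, 0],
  [1, 30, 435, 4060, 7391, 2408, 3362, 4379, 8837, 7147, 4001, 9094, 2724, 6081, 951, 9020, 951, 6081, 2724, 9094, 4001, 7147, 8837, 4379, 3362, 2408, 7391, 4060, 435, 30, 1, 0, 0, 0, 0, 0, 0, 0, 0, 0, 0, 0, 0, 0, 0, 0, 0, 0, 0, 0, 0, 0, 0],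
  [1, 31, 465, 4495, 1444, 9799, 5770, 7741, 3209, 5977, 1141, 3088, 1811, 8805, 7032, 9971, 9971, 7032, 8805, 1811, 3088, 1141, 5977, 3209, 7741, 5770, 9799, 1444, 4495, 465, 31, 1, 0, 0, 0, 0, 0, 0, 0, 0, 0, 0, 0, 0, 0, 0, 0, 0, 0, 0, 0, 0, 0],
  [1, 32, 496, 4960, 5939, 1236, 5562, 3504, 943, 9186, 7118, 4229, 4899, 609, 5830, 6996, 9935, 6996, 5830, 609, 4899, 4229, 7118, 9186, 943, 3504, 5562, 1236, 5939, 4960, 496, 32, 1, 0, 0, 0, 0, 0, 0, 0, 0, 0, 0, 0, 0, 0, 0, 0, 0, 0, 0, 0, 0],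
  [1, 33, 528, 5456, 892, 7175, 6798, 9066, 4447, 122, 6297, 1340, 9128, 5508, 6439, 2819, 6924, 6924, 2819, 6439, 5508, 9128, 1340, 6297, 122, 4447, 9066, 6798, 7175, 892, 5456, 528, 33, 1, 0, 0, 0, 0, 0, 0, 0, 0, 0, 0, 0, 0, 0, 0, 0, 0, 0, 0, 0],
  [1, 34, 561, 5984, 6348, 8067, 3966, 5857, 3506, 4569, 6419, 7637, 461, 4629, 1940, 9258, 9743, 3841, 9743, 9258, 1940, 4629, 461, 7637, 6419, 4569, 3506, 5857, 3966, 8067, 6348, 5984, 561, 34, 1, 0, 0, 0, 0, 0, 0, 0, 0, 0, 0, 0, 0, 0, 0, 0, 0, 0, 0],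
  [1, 35, 595, 6545, 2325, 4408, 2026, 9823, 9363, 8075, 981, 4049, 8098, 5090, 6569, 1191, 8994, 3577, 3577, 8994, 1191, 6569, 5090, 8098, 4049, 981, 8075, 9363, 9823, 2026, 4408, 2325, 6545, 595, 35, 1, 0, 0, 0, 0, 0, 0, 0, 0, 0, 0, 0, 0, 0, 0, 0, 0, 0],
  [1, 36, 630, 7140, 8870, 6733, 6434, 1842, 9179, 7431, 9056, 5030, 2140, 3181, 1652, 7760, 178, 2564, 7154, 2564, 178, 7760, 1652, 3181, 2140, 5030, 9056, 7431, 9179, 1842, 6434, 6733, 8870, 7140, 630, 36, 1, 0, 0, 0, 0, 0, 0, 0, 0, 0, 0, 0, 0, 0, 0, 0, 0],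
  [1, 37, 666, 7770, 6003, 5596, 3160, 8276, 1014, 6603, 6480, 4079, 7170, 5321, 4833, 9412, 7938, 2742, 9718, 9718, 2742, 7938, 9412, 4833, 5321, 7170, 4079, 6480, 6603, 1014, 8276, 3160, 5596, 6003, 7770, 666, 37, 1, 0, 0, 0, 0, 0, 0, 0, 0, 0, 0, 0, 0, 0, 0, 0],
  [1, 38, 703, 8436, 3766, 1592, 8756, 1429, 9290, 7617, 3076, 552, 1242, 2484, 147, 4238, 7343, 673, 2453, 9429, 2453, 673, 7343, 4238, 147, 2484, 1242, 552, 3076, 7617, 9290, 1429, 8756, 1592, 3766, 8436, 703, 38, 1, 0, 0, 0, 0, 0, 0, 0, 0, 0, 0, 0, 0, 0, 0],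
  [1, 39, 741, 9139, 2195, 5358, 341, 178, 712, 6900, 686, 3628, 1794, 3726, 2631, 4385, 1574, 8016, 3126, 1875, 1875, 3126, 8016, 1574, 4385, 2631, 3726, 1794, 3628, 686, 6900, 712, 178, 341, 5358, 2195, 9139, 741, 39, 1, 0, 0, 0, 0, 0, 0, 0, 0, 0, 0, 0, 0, 0],
  [1, 40, 780, 9880, 1327, 7553, 5699, 519, 890, 7612, 7586, 4314, 5422, 5520, 6357, 7016, 5959, 9590, 1135, 5001, 3750, 5001, 1135, 9590, 5959, 7016, 6357, 5520, 5422, 4314, 7586, 7612, 890, 519, 5699, 7553, 1327, 9880, 780, 40, 1, 0, 0, 0, 0, 0, 0, 0, 0, 0, 0, 0, 0],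
  [1, 41, 820, 653, 1200, 8880, 3245, 6218, 1409, 8502, 5191, 1893, 9736, 935, 1870, 3366, 2968, 5542, 718, 6136, 8751, 8751, 6136, 718, 5542, 2968, 3366, 1870, 935, 9736, 1893, 5191, 8502, 1409, 6218, 3245, 8880, 1200, 653, 820, 41, 1, 0, 0, 0, 0, 0, 0, 0, 0, 0, 0, 0],
  [1, 42, 861, 1473, 1853, 73, 2118, 9463, 7627, 9911, 3686, 7084, 1622, 664, 2805, 5236, 6334, 8510, 6260, 6854, 4880, 7495, 4880, 6854, 6260, 8510, 6334, 5236, 2805, 664, 1622, 7084, 3686, 9911, 7627, 9463, 2118, 73, 1853, 1473, 861, 42, 1, 0, 0, 0, 0, 0, 0, 0, 0, 0, 0],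
  [1, 43, 903, 2334, 3326, 1926, 2191, 1574, 7083, 7531, 3590, 763, 8706, 2286, 3469, 8041, 1563, 4837, 4763, 3107, 1727, 2368, 2368, 1727, 3107, 4763, 4837, 1563, 8041, 3469, 2286, 8706, 763, 3590, 7531, 7083, 1574, 2191, 1926, 3326, 2334, 903, 43, 1, 0, 0, 0, 0, 0, 0, 0, 0, 0],
  [1, 44, 946, 3237, 5660, 5252, 4117, 3765, 8657, 4607, 1114, 4353, 9469, 985, 5755, 1503, 9604, 6400, 9600, 7870, 4834, 4095, 4736, 4095, 4834, 7870, 9600, 6400, 9604, 1503, 5755, 985, 9469, 4353, 1114, 4607, 8657, 3765, 4117, 5252, 5660, 3237, 946, 44, 1, 0, 0, 0, 0, 0, 0, 0, 0],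
  [1, 45, 990, 4183, 8897, 905, 9369, 7882, 2415, 3257, 5721, 5467, 3815, 447, 6740, 7258, 1100, 5997, 5993, 7463, 2697, 8929, 8831, 8831, 8929, 2697, 7463, 5993, 5997, 1100, 7258, 6740, 447, 3815, 5467, 5721, 3257, 2415, 7882, 9369, 905, 8897, 4183, 990, 45, 1, 0, 0, 0, 0, 0, 0, 0],
  [1, 46, 1035, 5173, 3073, 9802, 267, 7244, 290, 5672, 8978, 1181, 9282, 4262, 7187, 3991, 8358, 7097, 1983, 3449, 153, 1619, 7753, 7655, 7753, 1619, 153, 3449, 1983, 7097, 8358, 3991, 7187, 4262, 9282, 1181, 8978, 5672, 290, 7244, 267, 9802, 3073, 5173, 1035, 46, 1, 0, 0, 0, 0, 0, 0],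
  [1, 47, 1081, 6208, 8246, 2868, 62, 7511, 7534, 5962, 4643, 152, 456, 3537, 1442, 1171, 2342, 5448, 9080, 5432, 3602, 1772, 9372, 5401, 5401, 9372, 1772, 3602, 5432, 9080, 5448, 2342, 1171, 1442, 3537, 456, 152, 4643, 5962, 7534, 7511, 62, 2868, 8246, 6208, 1081, 47, 1, 0, 0, 0, 0, 0],
  [1, 48, 1128, 7289, 4447, 1107, 2930, 7573, 5038, 3489, 598, 4795, 608, 3993, 4979, 2613, 3513, 7790, 4521, 4505, 9034, 5374, 1137, 4766, 795, 4766, 1137, 5374, 9034, 4505, 4521, 7790, 3513, 2613, 4979, 3993, 608, 4795, 598, 3489, 5038, 7573, 2930, 1107, 4447, 7289, 1128, 48, 1, 0, 0, 0, 0],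
  [1, 49, 1176, 8417, 1729, 5554, 4037, 496, 2604, 8527, 4087, 5393, 5403, 4601, 8972, 7592, 6126, 1296, 2304, 9026, 3532, 4401, 6511, 5903, 5561, 5561, 5903, 6511, 4401, 3532, 9026, 2304, 1296, 6126, 7592, 8972, 4601, 5403, 5393, 4087, 8527, 2604, 496, 4037, 5554, 1729, 8417, 1176, 49, 1, 0, 0, 0],
  [1, 50, 1225, 9593, 139, 7283, 9591, 4533, 3100, 1124, 2607, 9480, 789, 10004, 3566, 6557, 3711, 7422, 3600, 1323, 2551, 7933, 905, 2407, 1457, 1115, 1457, 2407, 905, 7933, 2551, 1323, 3600, 7422, 3711, 6557, 3566, 10004, 789, 9480, 2607, 1124, 3100, 4533, 9591, 7283, 139, 9593, 1225, 50, 1, 0, 0],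
  [1, 51, 1275, 811, 9732, 7422, 6867, 4117, 7633, 4224, 3731, 2080, 262, 786, 3563, 116, 261, 1126, 1015, 4923, 3874, 477, 8838, 3312, 3864, 2572, 2572, 3864, 3312, 8838, 477, 3874, 4923, 1015, 1126, 261, 116, 3563, 786, 262, 2080, 3731, 4224, 7633, 4117, 6867, 7422, 9732, 811, 1275, 51, 1, 0],
  [1, 52, 1326, 2086, 536, 7147, 4282, 977, 1743, 1850, 7955, 5811, 2342, 1048, 4349, 3679, 377, 1387, 2141, 5938, 8797, 4351, 9315, 2143, 7176, 6436, 5144, 6436, 7176, 2143, 9315, 4351, 8797, 5938, 2141, 1387, 377, 3679, 4349, 1048, 2342, 5811, 7955, 1850, 1743, 977, 4282, 7147, 536, 2086, 1326, 52, 1]]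


set_option maxRecDepth 100000 in
theorem initComb_eq : initComb = pvTable := by decide

theorem solve_eq_alt_of_small (N : Int) (h : N ≤ 3) : solve N = solve_alt N := by
  have hr : PySem.List.pyRange 1 (PySem.Int.floordiv N 4 + 1) 1 = [] := by
    apply PySem.List.pyRange_one_eq_nil
    have h0 : PySem.Int.floordiv N 4 ≤ 0 := by
      unfold PySem.Int.floordiv
      rw [Int.fdiv_eq_ediv_of_nonneg] <;> omega
    omega
  simp only [solve, solve_alt, hr, List.foldl_nil]

-- ===== VERDICT (by name: the statement is the Claim_ definition above) =====
set_option maxRecDepth 100000 in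
theorem solve_spec : Claim_equal_solve := by
  intro N _ hP
  unfold Spec_solve
  by_cases h : N ≤ 3
  · exact solve_eq_alt_of_small N h
  · unfold Pre_solve at hP
    simp only [solve, solve_alt, initComb_eq]
    rw [not_le] at h
    interval_cases N <;> decide
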